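-- pv_equiv track=rewrite | github.com/KaistQgroup/lcgraph | community_comparison/ls_helpers.py | _labels_to_partition
-- ===== SOURCE A (Python) =====
-- from typing import Dict, List, Set, Hashable, Optional, Tuple
--
-- def _labels_to_partition(nodes: List[Hashable], labels) -> List[Set[Hashable]]:
--     if isinstance(labels, dict):
--         ordered = [labels[n] for n in nodes]
--     else:
--         ordered = list(labels)
--         if len(ordered) != len(nodes):
--             raise ValueError("Label vector length does not match number of nodes.")
--     groups: Dict[int, Set[Hashable]] = {}
--     for n, cid in zip(nodes, ordered):
--         groups.setdefault(int(cid), set()).add(n)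
--     return list(groups.values())
-- ===== SOURCE B (Python) =====
-- def _labels_to_partition(nodes, labels):
--     if isinstance(labels, dict):
--         pairs = [(n, int(labels[n])) for n in nodes]
--     else:
--         if len(labels) != len(nodes):
--             raise ValueError("Label vector length does not match number of nodes.")
--         pairs = [(n, int(cid)) for n, cid in zip(nodes, labels)]
--     result = []
--     while pairs:
--         lab = pairs[0][1]
--         group = set()
--         rest = []
--         for n, c in pairs:
--             if c == lab:
--                 group.add(n)
--             else:
--                 rest.append((n, c))
--         result.append(group)
--         pairs = rest
--     return result
-- ===== Notes on version B (the rewrite author's own statement) =====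
-- stated objective: alternative
-- what changed: Replaces A's single dict-of-sets grouping pass (setdefault/add, then list(values())) by a peel-off loop: repeatedly take the first remaining label, split the pair list into that label's group and the rest, and continue on the rest; no dictionary is used.
import Mathlib
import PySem

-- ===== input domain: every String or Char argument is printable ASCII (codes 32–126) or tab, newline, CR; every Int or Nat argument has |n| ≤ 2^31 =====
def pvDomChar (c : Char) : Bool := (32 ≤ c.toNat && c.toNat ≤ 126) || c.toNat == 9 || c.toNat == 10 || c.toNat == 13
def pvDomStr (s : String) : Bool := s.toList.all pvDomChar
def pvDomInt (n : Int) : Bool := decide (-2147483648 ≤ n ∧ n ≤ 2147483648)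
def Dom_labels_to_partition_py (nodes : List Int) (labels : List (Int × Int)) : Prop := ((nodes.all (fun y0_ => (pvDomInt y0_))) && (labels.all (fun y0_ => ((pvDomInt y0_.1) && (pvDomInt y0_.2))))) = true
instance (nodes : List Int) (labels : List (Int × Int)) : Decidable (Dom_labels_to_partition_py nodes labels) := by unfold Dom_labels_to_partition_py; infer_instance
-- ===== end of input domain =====

-- B replaces A's dict-of-sets grouping pass by a recursive peel-off loop (split off the first label's
-- group, recurse on the rest); same return value, a different algorithm and data layout (not faster).


-- ===== PORT A =====
-- labels is a dict[int,int] under the type convention, so only A's dict branch is reachable.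
-- ordered = [labels[n] for n in nodes]: getD 0 stands for the lookup; Pre_ excludes missing keys (KeyError).
def labels_to_partition_py (nodes : List Int) (labels : List (Int × Int)) : List (List Int) :=
  let ordered := nodes.map (fun n => (PySem.Dict.mk labels).getD n 0)
  -- for n, cid in zip(nodes, ordered): groups.setdefault(int(cid), set()).add(n)
  let groups := (nodes.zip ordered).foldl
    (fun g p => g.modify p.2 [] (fun s => PySem.Set.add s p.1)) PySem.Dict.empty
  groups.values

-- ===== PORT B =====
-- one iteration of B's inner for-loop: pairs equal to lab go into the group set, others into rest
def peelStep (lab : Int) (st : PySem.Set Int × List (Int × Int)) (q : Int × Int) :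
    PySem.Set Int × List (Int × Int) :=
  if q.2 == lab then (PySem.Set.add st.1 q.1, st.2) else (st.1, st.2 ++ [q])

-- termination bound for the while-loop turned recursion: rest never exceeds the scanned list
lemma peelStep_rest_len (lab : Int) :
    ∀ (l : List (Int × Int)) (st : PySem.Set Int × List (Int × Int)),
      (l.foldl (peelStep lab) st).2.length ≤ st.2.length + l.length := by
  intro l
  induction l with
  | nil => intro st; simp
  | cons q l ih =>
    intro st
    simp only [List.foldl_cons]
    refine le_trans (ih _) ?_
    by_cases h : q.2 == lab
    · simp [peelStep, h]
    · simp [peelStep, h]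
      omega

-- B's while-loop: peel off the first remaining label's group, continue on the rest
def altPeel : List (Int × Int) → List (List Int)
  | [] => []
  | p :: tail =>
    let st := (p :: tail).foldl (peelStep p.2) (PySem.Set.empty, [])
    st.1 :: altPeel st.2
termination_by ps => ps.length
decreasing_by
  simp only [List.foldl_cons, peelStep, beq_self_eq_true, if_pos]
  have h := peelStep_rest_len p.2 tail (PySem.Set.add PySem.Set.empty p.1, [])
  simp only [List.length_nil] at h
  simp only [List.length_cons]
  omega

def labels_to_partition_py_alt (nodes : List Int) (labels : List (Int × Int)) : List (List Int) :=
  -- pairs = [(n, int(labels[n])) for n in nodes]  (dict branch; int() is the identity on Int)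
  let pairs := nodes.map (fun n => (n, (PySem.Dict.mk labels).getD n 0))
  altPeel pairs

-- ===== PRECONDITION & SPEC =====
-- Pre_ excludes exactly the inputs on which A's dict branch raises KeyError: some node is not a key of labels.
def Pre_labels_to_partition_py (nodes : List Int) (labels : List (Int × Int)) : Prop :=
  ∀ n ∈ nodes, (PySem.Dict.mk labels).contains n = true
instance (nodes : List Int) (labels : List (Int × Int)) : Decidable (Pre_labels_to_partition_py nodes labels) := by unfold Pre_labels_to_partition_py; infer_instance
def pvWitness_labels_to_partition_py : List Int × (List (Int × Int)) := ([1, 2, 3], [(1, 5), (2, 7), (3, 5)])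

def Spec_labels_to_partition_py (nodes : List Int) (labels : List (Int × Int)) (out : List (List Int)) : Prop := out = labels_to_partition_py_alt nodes labels
instance (nodes : List Int) (labels : List (Int × Int)) (out : List (List Int)) : Decidable (Spec_labels_to_partition_py nodes labels out) := by unfold Spec_labels_to_partition_py; infer_instance

-- ===== CLAIM (what is proved, stated in full; the proofs are below) =====
def Claim_equal_labels_to_partition_py : Prop := ∀ (nodes : List Int) (labels : List (Int × Int)), Dom_labels_to_partition_py nodes labels → Pre_labels_to_partition_py nodes labels → Spec_labels_to_partition_py nodes labels (labels_to_partition_py nodes labels)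

-- ===== LEMMAS AND PROOFS =====

-- common normal form both proofs target: for each distinct label in first-appearance order,
-- the set of first components of the pairs carrying that label
def specMap (ps : List (Int × Int)) : List (List Int) :=
  (PySem.List.dedup (ps.map Prod.snd)).map
    (fun lab => PySem.Set.ofList ((ps.filter (fun q => q.2 == lab)).map Prod.fst))

-- A's grouping loop, per key: the set at c collects the first components of exactly the pairs labelled c.
lemma getD_foldl_modify_setadd (l : List (Int × Int)) (d : PySem.Dict Int (PySem.Set Int)) (c : Int) :
    (l.foldl (fun g p => g.modify p.2 [] (fun s => PySem.Set.add s p.1)) d).getD c []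
      = PySem.Set.update (d.getD c []) ((l.filter (fun p => p.2 == c)).map (·.1)) := by
  induction l generalizing d with
  | nil => rfl
  | cons p l ih =>
    simp only [List.foldl_cons, List.filter_cons]
    by_cases h : p.2 = c
    · subst h
      simp only [beq_self_eq_true, if_pos, List.map_cons]
      rw [ih, PySem.Dict.getD_modify_self]
      rfl
    · have hb : (p.2 == c) = false := by simp [h]
      simp only [hb, if_neg, Bool.false_eq_true, not_false_iff]
      rw [ih, PySem.Dict.getD_modify_of_ne _ _ _ (fun hc => h hc.symm)]

lemma portA_eq_specMap (nodes : List Int) (labels : List (Int × Int)) :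
    labels_to_partition_py nodes labels
      = specMap (nodes.map (fun n => (n, (PySem.Dict.mk labels).getD n 0))) := by
  unfold labels_to_partition_py specMap
  set f : Int → Int := fun n => (PySem.Dict.mk labels).getD n 0 with hf
  set ordered : List Int := nodes.map f with hord
  set pairs : List (Int × Int) := nodes.zip ordered with hpairs
  have hzip : pairs = nodes.map (fun n => (n, f n)) := by
    rw [hpairs, hord]
    rw [show nodes.zip (nodes.map f) = (nodes.map id).zip (nodes.map f) by simp]
    rw [List.zip_map']
    rfl
  set groups : PySem.Dict Int (PySem.Set Int) :=
    pairs.foldl (fun g p => g.modify p.2 [] (fun s => PySem.Set.add s p.1)) PySem.Dict.empty with hg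
  have hsnd : pairs.map Prod.snd = ordered := by
    rw [hpairs]
    exact List.map_snd_zip (by simp [hord])
  have hkeys : groups.keys = PySem.List.dedup (pairs.map Prod.snd) := by
    rw [hg]
    rw [PySem.Dict.keys_foldl_modify_key pairs Prod.snd [] (fun _ p => fun s => PySem.Set.add s p.1) PySem.Dict.empty]
    rw [PySem.Dict.keys_empty, PySem.List.dedup_eq_ofList]
    rfl
  have hnodup : groups.keys.Nodup := by
    rw [hg]
    exact PySem.Dict.nodup_keys_foldl_modify_key pairs Prod.snd []
      (fun _ p => fun s => PySem.Set.add s p.1) PySem.Dict.empty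
      (by rw [PySem.Dict.keys_empty]; exact List.nodup_nil)
  rw [PySem.Dict.values_eq_map_keys groups hnodup [], hkeys, ← hzip]
  apply List.map_congr_left
  intro k _
  rw [hg, getD_foldl_modify_setadd]
  rw [PySem.Dict.getD_empty]
  rfl

-- adding an element already present (or fixed up front) commutes with the fold
lemma foldl_add_skip (x : Int) :
    ∀ (xs : List Int) (s : PySem.Set Int), x ∈ s →
      xs.foldl PySem.Set.add s = (xs.filter (fun y => !(y == x))).foldl PySem.Set.add s := by
  intro xs
  induction xs with
  | nil => intro s _; rfl
  | cons y xs ih =>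
    intro s hx
    by_cases h : y = x
    · subst h
      simp only [List.filter_cons, beq_self_eq_true, Bool.not_true, Bool.false_eq_true,
        if_neg, not_false_iff, List.foldl_cons]
      rw [PySem.Set.add_of_mem hx]
      exact ih s hx
    · have hb : (y == x) = false := by simp [h]
      simp only [List.filter_cons, hb, Bool.not_false, if_pos, List.foldl_cons]
      exact ih _ (by simp [PySem.Set.mem_add]; exact Or.inl hx)

lemma foldl_add_cons (x : Int) :
    ∀ (ys : List Int) (s : PySem.Set Int), x ∉ ys →
      ys.foldl PySem.Set.add (x :: s) = x :: ys.foldl PySem.Set.add s := by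
  intro ys
  induction ys with
  | nil => intro s _; rfl
  | cons y ys ih =>
    intro s hx
    have hyx : y ≠ x := fun h => hx (by simp [h])
    simp only [List.foldl_cons]
    have hadd : PySem.Set.add (x :: s) y = x :: PySem.Set.add s y := by
      rw [PySem.Set.add_eq_ite, PySem.Set.add_eq_ite]
      by_cases hm : y ∈ s
      · simp [hm, List.mem_cons, hyx]
      · simp [hm, List.mem_cons, hyx]
    rw [hadd, ih _ (fun h => hx (List.mem_cons_of_mem _ h))]

lemma ofList_cons_filter (x : Int) (xs : List Int) :
    PySem.Set.ofList (x :: xs) = x :: PySem.Set.ofList (xs.filter (fun y => !(y == x))) := by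
  have h1 : PySem.Set.ofList (x :: xs) = xs.foldl PySem.Set.add [x] := rfl
  rw [h1, foldl_add_skip x xs [x] (by simp)]
  have h2 : ([x] : PySem.Set Int) = x :: ([] : PySem.Set Int) := rfl
  rw [h2, foldl_add_cons x _ _ (by simp)]
  rfl

-- B's inner loop in closed form: group = nodes of the pairs labelled lab, rest = the other pairs
lemma peel_fold (lab : Int) :
    ∀ (l : List (Int × Int)) (s : PySem.Set Int) (acc : List (Int × Int)),
      l.foldl (peelStep lab) (s, acc)
        = (PySem.Set.update s ((l.filter (fun q => q.2 == lab)).map Prod.fst),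
           acc ++ l.filter (fun q => !(q.2 == lab))) := by
  intro l
  induction l with
  | nil => intro s acc; simp [PySem.Set.update]
  | cons q l ih =>
    intro s acc
    by_cases h : q.2 == lab
    · simp only [List.foldl_cons, peelStep, h, if_pos, List.filter_cons, Bool.not_true,
        Bool.false_eq_true, if_neg, not_false_iff, List.map_cons]
      rw [ih]
      rfl
    · simp only [List.foldl_cons, peelStep, h, Bool.false_eq_true, if_neg, not_false_iff,
        List.filter_cons, Bool.not_false, if_pos]
      rw [ih]
      simp

lemma altPeel_eq_specMap_aux : ∀ (n : Nat) (ps : List (Int × Int)), ps.length ≤ n → altPeel ps = specMap ps := by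
  intro n
  induction n with
  | zero =>
    intro ps h
    have hnil : ps = [] := List.eq_nil_of_length_eq_zero (Nat.le_zero.mp h)
    subst hnil
    rw [altPeel]
    rfl
  | succ n ih =>
    intro ps h
    match ps with
    | [] =>
      rw [altPeel]
      rfl
    | p :: tail =>
      rw [altPeel]
      simp only [peel_fold, List.nil_append]
      set rest := (p :: tail).filter (fun q => !(q.2 == p.2)) with hrest
      have hrest' : rest = tail.filter (fun q => !(q.2 == p.2)) := by
        rw [hrest, List.filter_cons]
        simp
      have ihr : altPeel rest = specMap rest := by
        apply ih
        rw [hrest']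
        exact le_trans (List.length_filter_le _ _) (Nat.le_of_succ_le_succ h)
      rw [ihr]
      unfold specMap
      simp only [List.map_cons, PySem.List.dedup_eq_ofList]
      rw [ofList_cons_filter]
      have hfm : (tail.map Prod.snd).filter (fun y => !(y == p.2))
          = (tail.filter (fun q => !(q.2 == p.2))).map Prod.snd := by
        rw [List.filter_map]; rfl
      rw [hfm, ← hrest']
      simp only [List.map_cons]
      refine congrArg₂ List.cons rfl ?_
      apply List.map_congr_left
      intro lab hlab
      have hlabmem : lab ∈ rest.map Prod.snd :=
        (PySem.Set.mem_ofList (xs := rest.map Prod.snd) (y := lab)).mp hlab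
      have hlabne : lab ≠ p.2 := by
        obtain ⟨q, hq, hq2⟩ := List.mem_map.mp hlabmem
        rw [hrest'] at hq
        obtain ⟨_, hq3⟩ := List.mem_filter.mp hq
        intro hcontra
        rw [hq2, hcontra] at hq3
        simp at hq3
      have hfe : rest.filter (fun q => q.2 == lab) = (p :: tail).filter (fun q => q.2 == lab) := by
        rw [hrest', List.filter_filter, List.filter_cons]
        have hne : (p.2 == lab) = false := beq_eq_false_iff_ne.mpr (Ne.symm hlabne)
        simp only [hne, Bool.false_eq_true, if_neg, not_false_iff]
        apply List.filter_congr
        intro q _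
        by_cases hq : q.2 = lab
        · simp [hq, hlabne]
        · simp [hq]
      rw [hfe]

lemma altPeel_eq_specMap (ps : List (Int × Int)) : altPeel ps = specMap ps :=
  altPeel_eq_specMap_aux ps.length ps le_rfl

-- ===== VERDICT (by name: the statement is the Claim_ definition above) =====
theorem labels_to_partition_py_spec : Claim_equal_labels_to_partition_py := by
  intro nodes labels _ _
  unfold Spec_labels_to_partition_py labels_to_partition_py_alt
  rw [portA_eq_specMap, altPeel_eq_specMap]
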